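-- pv_equiv track=rewrite | github.com/Lucas-Gui/OpenNMT-tf | scripts/tweak_attn/align_pos.py | replace_dashes
-- ===== SOURCE A (Python) =====
-- def replace_dashes(line : str):
--     """It seems that pyonnmttok replaces any series of ----- by a — during tokenization"""
--     l = []
--     switch = False
--     for c in line:
--         if c != "-":
--             if switch :
--                 l.append("—")
--                 switch=False
--             l.append(c)
--         elif not switch:
--             switch=True
--     if switch:
--         l.append("—")
--     return "".join(l)
-- ===== SOURCE B (Python) =====
-- def replace_dashes(line : str):
--     """Collapse each maximal run of '-' into a single em-dash.
--
--     One stateless pass with lookahead: emit every non-dash character, and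
--     emit an em-dash exactly at the LAST dash of each run (i.e. at a dash
--     whose successor is not a dash); the final character is handled on its
--     own since it has no successor.
--     """
--     out = []
--     for c, nxt in zip(line, line[1:]):
--         if c != '-':
--             out.append(c)
--         elif nxt != '-':
--             out.append('—')
--     if line:
--         c = line[-1]
--         out.append('—' if c == '-' else c)
--     return ''.join(out)
-- ===== Notes on version B (the rewrite author's own statement) =====
-- stated objective: simpler
-- what changed: A's boolean-flag state machine (emit an em-dash when leaving a dash run or at end of line) is replaced by a stateless single pass with one-character lookahead over zip(line, line[1:]) that emits the em-dash at the last dash of each run, with the final character handled separately.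
import Mathlib
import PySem

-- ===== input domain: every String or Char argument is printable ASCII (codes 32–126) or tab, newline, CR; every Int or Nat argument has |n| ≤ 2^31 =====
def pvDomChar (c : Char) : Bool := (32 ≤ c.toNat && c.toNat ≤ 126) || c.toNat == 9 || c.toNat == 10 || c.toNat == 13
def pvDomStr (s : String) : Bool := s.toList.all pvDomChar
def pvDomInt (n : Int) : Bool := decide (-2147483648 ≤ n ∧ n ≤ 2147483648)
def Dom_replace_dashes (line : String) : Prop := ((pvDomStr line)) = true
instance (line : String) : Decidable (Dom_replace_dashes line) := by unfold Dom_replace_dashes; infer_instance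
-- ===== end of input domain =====

-- B replaces A's boolean-flag state machine by a stateless single pass with one-character
-- lookahead (emit an em-dash at the last dash of each run); objective: simpler.

-- ===== PORT A =====
-- loop body of A: state = (accumulated characters, switch flag)
def pvStepA (st : List Char × Bool) (c : Char) : List Char × Bool :=
  if c ≠ '-' then
    (if st.2 then (st.1 ++ ['—', c], false) else (st.1 ++ [c], false))
  else if st.2 = false then (st.1, true)
  else st

def replace_dashes (line : String) : String :=
  String.mk
    (if (line.toList.foldl pvStepA ([], false)).2 then
       (line.toList.foldl pvStepA ([], false)).1 ++ ['—']
     else (line.toList.foldl pvStepA ([], false)).1)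

-- ===== PORT B =====
-- loop body of B over the (c, nxt) pairs of zip(line, line[1:])
def pvStepB (acc : List Char) (p : Char × Char) : List Char :=
  if p.1 ≠ '-' then acc ++ [p.1]
  else if p.2 ≠ '-' then acc ++ ['—']
  else acc

def replace_dashes_alt (line : String) : String :=
  -- zip(line, line[1:]) = toList.zip (toList.drop 1); "if line:" + line[-1] = the getLast? match
  String.mk
    (match line.toList.getLast? with
      | some c =>
          ((line.toList.zip (line.toList.drop 1)).foldl pvStepB []) ++ [if c = '-' then '—' else c]
      | none => (line.toList.zip (line.toList.drop 1)).foldl pvStepB [])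

-- ===== PRECONDITION & SPEC =====
def Spec_replace_dashes (line : String) (out : String) : Prop := out = replace_dashes_alt line
instance (line : String) (out : String) : Decidable (Spec_replace_dashes line out) := by unfold Spec_replace_dashes; infer_instance

-- ===== CLAIM (what is proved, stated in full; the proofs are below) =====
def Claim_equal_replace_dashes : Prop := ∀ (line : String), Dom_replace_dashes line → Spec_replace_dashes line (replace_dashes line)

-- ===== LEMMAS AND PROOFS =====

-- reference shape both loops compute: the collapsed list, read two characters at a time
def pvCollapse : List Char → List Char
  | [] => []
  | [c] => if c = '-' then ['—'] else [c]
  | c :: c2 :: rest =>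
      (if c ≠ '-' then [c] else if c2 ≠ '-' then ['—'] else []) ++ pvCollapse (c2 :: rest)

theorem pvCollapse_cons_of_ne (c : Char) (rest : List Char) (h : c ≠ '-') :
    pvCollapse (c :: rest) = c :: pvCollapse rest := by
  cases rest with
  | nil => simp [pvCollapse, h]
  | cons c2 r => simp [pvCollapse, h]

theorem pvA_loop (cs acc : List Char) (sw : Bool) :
    (if (cs.foldl pvStepA (acc, sw)).2 then (cs.foldl pvStepA (acc, sw)).1 ++ ['—']
     else (cs.foldl pvStepA (acc, sw)).1)
      = acc ++ (if sw then pvCollapse ('-' :: cs) else pvCollapse cs) := by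
  induction cs generalizing acc sw with
  | nil => cases sw <;> simp [pvCollapse]
  | cons c rest ih =>
    by_cases hc : c = '-'
    · subst hc
      cases sw with
      | false =>
        have h1 : pvStepA (acc, false) '-' = (acc, true) := by simp [pvStepA]
        simp only [List.foldl_cons, h1]
        rw [ih acc true]; simp
      | true =>
        have h1 : pvStepA (acc, true) '-' = (acc, true) := by simp [pvStepA]
        simp only [List.foldl_cons, h1]
        rw [ih acc true]
        simp [pvCollapse]
    · cases sw with
      | false =>
        have h1 : pvStepA (acc, false) c = (acc ++ [c], false) := by simp [pvStepA, hc]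
        simp only [List.foldl_cons, h1]
        rw [ih (acc ++ [c]) false]
        simp [pvCollapse_cons_of_ne c rest hc]
      | true =>
        have h1 : pvStepA (acc, true) c = (acc ++ ['—', c], false) := by simp [pvStepA, hc]
        simp only [List.foldl_cons, h1]
        rw [ih (acc ++ ['—', c]) false]
        have h2 : pvCollapse ('-' :: c :: rest) = '—' :: c :: pvCollapse rest := by
          simp [pvCollapse, hc, pvCollapse_cons_of_ne c rest hc]
        simp [h2]

theorem pvB_loop (cs acc : List Char) :
    (match cs.getLast? with
      | some c => ((cs.zip (cs.drop 1)).foldl pvStepB acc) ++ [if c = '-' then '—' else c]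
      | none => (cs.zip (cs.drop 1)).foldl pvStepB acc)
      = acc ++ pvCollapse cs := by
  induction cs generalizing acc with
  | nil => simp [pvCollapse]
  | cons c rest ih =>
    cases rest with
    | nil => by_cases hc : c = '-' <;> simp [pvCollapse, hc]
    | cons c2 r =>
      have h := ih (pvStepB acc (c, c2))
      simp only [List.drop_succ_cons, List.drop_zero] at h
      simp only [List.getLast?_cons_cons, List.drop_succ_cons, List.drop_zero,
        List.zip_cons_cons, List.foldl_cons]
      rw [h]
      by_cases hc : c = '-' <;> by_cases hc2 : c2 = '-' <;>
        simp [pvStepB, pvCollapse, hc, hc2]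

-- ===== VERDICT (by name: the statement is the Claim_ definition above) =====
theorem replace_dashes_spec : Claim_equal_replace_dashes := by
  intro line _
  unfold Spec_replace_dashes replace_dashes replace_dashes_alt
  rw [pvA_loop line.toList [] false, pvB_loop line.toList []]
  simp
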